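-- pv_equiv track=rewrite | github.com/kguzek/coursework-wust | js/lab2/find_sentence_no_adjacent_words_same_letter.py | has_no_adjacent_same_letter_words
-- ===== SOURCE A (Python) =====
-- def has_no_adjacent_same_letter_words(sentence: str) -> bool:
--     """
--     Check if no two adjacent words in the sentence start with the same letter.
--
--     Uses only string operations - no lists, tuples, or dicts.
--     Words are compared case-insensitively, and only alphabetic starting
--     characters are considered.
--     """
--     if not sentence:
--         return False
--
--     in_word = False
--     prev_first_char = ""
--     current_word_first_char = ""
--
--     for char in sentence:
--         if char.isalpha():
--             if not in_word:
--                 # Start of a new word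
--                 current_word_first_char = char.lower()
--                 if prev_first_char and current_word_first_char == prev_first_char:
--                     return False
--                 prev_first_char = current_word_first_char
--                 in_word = True
--         else:
--             # Non-alphabetic character - end of word
--             in_word = False
--
--     return True
-- ===== SOURCE B (Python) =====
-- def has_no_adjacent_same_letter_words(sentence: str) -> bool:
--     """Two-phase: collect word-initial letters, then check adjacent pairs differ."""
--     if not sentence:
--         return False
--     letters = []
--     i = 0
--     n = len(sentence)
--     while i < n:
--         if sentence[i].isalpha():
--             letters.append(sentence[i].lower())
--             while i < n and sentence[i].isalpha():
--                 i += 1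
--         else:
--             i += 1
--     return all(a != b for a, b in zip(letters, letters[1:]))
-- ===== Notes on version B (the rewrite author's own statement) =====
-- stated objective: simpler
-- what changed: Replaces A's one-pass state machine (in_word flag, previous-letter string, early return) by a two-phase build-then-check: collect the list of word-initial lowered letters with an index loop that skips each word, then test that all adjacent pairs differ.
import Mathlib
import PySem

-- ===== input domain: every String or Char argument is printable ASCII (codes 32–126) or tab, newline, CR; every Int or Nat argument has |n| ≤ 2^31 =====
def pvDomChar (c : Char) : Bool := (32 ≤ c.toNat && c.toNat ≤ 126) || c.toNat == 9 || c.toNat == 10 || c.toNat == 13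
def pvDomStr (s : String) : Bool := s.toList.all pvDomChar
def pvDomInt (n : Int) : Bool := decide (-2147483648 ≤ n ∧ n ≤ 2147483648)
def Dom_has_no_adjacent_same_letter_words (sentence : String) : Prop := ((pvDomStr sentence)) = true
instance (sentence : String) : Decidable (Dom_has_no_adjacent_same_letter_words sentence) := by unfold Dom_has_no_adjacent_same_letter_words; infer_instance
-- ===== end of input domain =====

-- B replaces A's inline early-return state machine by a two-phase build-then-check
-- (collect the word-initial letters, then test all adjacent pairs); objective: simpler.

-- ===== PORT A =====
-- A's for-loop with state (in_word, prev_first_char); prev_first_char "" ↦ none,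
-- a set single lowered char ↦ some; 'return False' inside the loop ↦ returning false.
def pvGoA : List Char → Bool → Option Char → Bool
  | [], _, _ => true
  | c :: rest, inWord, prev =>
    if PySem.Chars.isalpha c then
      if !inWord then
        let cur := PySem.Chars.lowerChar c
        if (match prev with | some p => cur == p | none => false) then false
        else pvGoA rest true (some cur)
      else pvGoA rest inWord prev
    else pvGoA rest false prev

def has_no_adjacent_same_letter_words (sentence : String) : Bool :=
  if sentence == "" then false
  else pvGoA sentence.toList false none

-- ===== PORT B =====
-- phase 1 of Source B: the outer index loop (pvFirstLetters) with its inner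
-- alpha-skipping while-loop (pvAfterWord), collecting the word-initial letters.
mutual
def pvFirstLetters : List Char → List Char
  | [] => []
  | c :: rest =>
    if PySem.Chars.isalpha c then PySem.Chars.lowerChar c :: pvAfterWord rest
    else pvFirstLetters rest
def pvAfterWord : List Char → List Char
  | [] => []
  | c :: rest =>
    if PySem.Chars.isalpha c then pvAfterWord rest
    else pvFirstLetters rest
end

-- phase 2 of Source B: all(a != b for a, b in zip(letters, letters[1:]))
def pvAllAdjDiff : List Char → Bool
  | a :: b :: rest => (a != b) && pvAllAdjDiff (b :: rest)
  | _ => true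

def has_no_adjacent_same_letter_words_alt (sentence : String) : Bool :=
  if sentence == "" then false
  else pvAllAdjDiff (pvFirstLetters sentence.toList)

-- ===== PRECONDITION & SPEC =====
def Spec_has_no_adjacent_same_letter_words (sentence : String) (out : Bool) : Prop := out = has_no_adjacent_same_letter_words_alt sentence
instance (sentence : String) (out : Bool) : Decidable (Spec_has_no_adjacent_same_letter_words sentence out) := by unfold Spec_has_no_adjacent_same_letter_words; infer_instance

-- ===== CLAIM (what is proved, stated in full; the proofs are below) =====
def Claim_equal_has_no_adjacent_same_letter_words : Prop := ∀ (sentence : String), Dom_has_no_adjacent_same_letter_words sentence → Spec_has_no_adjacent_same_letter_words sentence (has_no_adjacent_same_letter_words sentence)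

-- ===== LEMMAS AND PROOFS =====

-- checking letters with an optional previously seen letter prepended
def pvAllAdjDiffOpt (prev : Option Char) (ls : List Char) : Bool :=
  match prev with
  | none => pvAllAdjDiff ls
  | some p => pvAllAdjDiff (p :: ls)

theorem pvGoA_eq : ∀ (chars : List Char) (inWord : Bool) (prev : Option Char),
    pvGoA chars inWord prev =
      pvAllAdjDiffOpt prev (if inWord then pvAfterWord chars else pvFirstLetters chars) := by
  intro chars
  induction chars with
  | nil =>
    intro inWord prev
    cases inWord <;> cases prev <;> simp [pvGoA, pvFirstLetters, pvAfterWord, pvAllAdjDiffOpt, pvAllAdjDiff]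
  | cons c rest ih =>
    intro inWord prev
    by_cases hα : PySem.Chars.isalpha c = true
    · cases inWord with
      | false =>
        simp only [pvGoA, pvFirstLetters, hα, if_true, Bool.not_false]
        cases prev with
        | none =>
          simp [pvAllAdjDiffOpt, ih]
        | some p =>
          by_cases heq : PySem.Chars.lowerChar c == p
          · simp [pvAllAdjDiffOpt, pvAllAdjDiff, heq]
            have : p = PySem.Chars.lowerChar c := (beq_iff_eq.mp heq).symm
            simp [this]
          · simp [pvAllAdjDiffOpt, pvAllAdjDiff, heq, ih]
            have : ¬ p = PySem.Chars.lowerChar c := fun h => heq (by simp [h])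
            simp [this]
      | true =>
        simp [pvGoA, pvAfterWord, hα, ih]
    · cases inWord <;>
        simp [pvGoA, pvFirstLetters, pvAfterWord, hα, ih]

-- ===== VERDICT (by name: the statement is the Claim_ definition above) =====
theorem has_no_adjacent_same_letter_words_spec : Claim_equal_has_no_adjacent_same_letter_words := by
  intro sentence _
  unfold Spec_has_no_adjacent_same_letter_words
  unfold has_no_adjacent_same_letter_words has_no_adjacent_same_letter_words_alt
  by_cases h : sentence == ""
  · simp [h]
  · simp [h, pvGoA_eq, pvAllAdjDiffOpt]
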